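-- pv_equiv track=rewrite | github.com/juniooor/Desafios-CI-T-NextGen2022 | desafio2CI&T.py | retorna_menor_e_maior_valor_de_vendas
-- ===== SOURCE A (Python) =====
-- def retorna_menor_e_maior_valor_de_vendas(tickets):
--     media = []
--     for vendedor in tickets:
--         for vendas in vendedor:
--             if vendas >= 20 and vendas <=500:
--                 media.append(vendas)
--
--     menor = min(media)
--     maior = max(media)
--
--     maioremenor = [menor, maior]
--
--     return maioremenor
-- ===== SOURCE B (Python) =====
-- def retorna_menor_e_maior_valor_de_vendas(tickets):
--     menor = maior = None
--     for vendedor in tickets: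
--         for vendas in vendedor:
--             if 20 <= vendas <= 500:
--                 if menor is None or vendas < menor:
--                     menor = vendas
--                 if maior is None or vendas > maior:
--                     maior = vendas
--     if menor is None:
--         raise ValueError("no sale value between 20 and 500")
--     return [menor, maior]
-- ===== Notes on version B (the rewrite author's own statement) =====
-- stated objective: simpler
-- what changed: Replaces the intermediate filtered list plus two library scans (min and max) with a single pass maintaining running menor/maior variables; Pre_ excludes inputs with no value in [20,500], where A raises ValueError from min([]) and B raises ValueError too.
-- outside the precondition, e.g. on retorna_menor_e_maior_valor_de_vendas([]): A raises ValueError, B raises ValueError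
import Mathlib
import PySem

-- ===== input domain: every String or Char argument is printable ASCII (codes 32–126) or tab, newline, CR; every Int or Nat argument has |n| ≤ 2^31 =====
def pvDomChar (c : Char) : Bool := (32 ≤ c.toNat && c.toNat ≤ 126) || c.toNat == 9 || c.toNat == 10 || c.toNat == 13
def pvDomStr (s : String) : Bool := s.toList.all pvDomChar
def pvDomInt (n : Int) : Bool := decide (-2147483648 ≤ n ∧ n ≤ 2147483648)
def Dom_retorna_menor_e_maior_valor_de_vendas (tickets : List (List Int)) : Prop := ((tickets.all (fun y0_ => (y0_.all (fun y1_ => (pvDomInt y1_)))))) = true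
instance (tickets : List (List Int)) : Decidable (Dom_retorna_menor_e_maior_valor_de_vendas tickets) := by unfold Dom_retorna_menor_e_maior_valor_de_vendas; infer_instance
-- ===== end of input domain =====

-- B replaces A's intermediate filtered list plus separate min()/max() scans by one
-- pass with running minimum/maximum variables (simpler, O(1) extra space).


-- ===== PORT A =====
def retorna_menor_e_maior_valor_de_vendas (tickets : List (List Int)) : List Int :=
  let media := tickets.foldl
    (fun acc vendedor =>
      vendedor.foldl (fun m vendas => if vendas ≥ 20 ∧ vendas ≤ 500 then m ++ [vendas] else m) acc)
    []
  -- min(media) / max(media): raise ValueError on empty media (excluded by Pre_)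
  match PySem.List.min? media (fun x => x), PySem.List.max? media (fun x => x) with
  | some menor, some maior => [menor, maior]
  | _, _ => []

-- ===== PORT B =====
-- state = (menor, maior), each None before the first qualifying value
def pvAltStep (st : Option Int × Option Int) (vendas : Int) : Option Int × Option Int :=
  if 20 ≤ vendas ∧ vendas ≤ 500 then
    ((match st.1 with
      | none => some vendas
      | some menor => if vendas < menor then some vendas else some menor),
     (match st.2 with
      | none => some vendas
      | some maior => if vendas > maior then some vendas else some maior))
  else st

-- B raises ValueError when menor is still None (excluded by Pre_)
def pvFinish : Option Int × Option Int → List Int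
  | (some menor, some maior) => [menor, maior]
  | (some _, none) => []
  | (none, some _) => []
  | (none, none) => []

def retorna_menor_e_maior_valor_de_vendas_alt (tickets : List (List Int)) : List Int :=
  pvFinish (tickets.foldl (fun st vendedor => vendedor.foldl pvAltStep st) (none, none))

-- ===== PRECONDITION & SPEC =====
-- Pre_ excludes inputs with no sale value in [20, 500]: there A raises ValueError
-- in min([]) and B raises ValueError as well.
def Pre_retorna_menor_e_maior_valor_de_vendas (tickets : List (List Int)) : Prop :=
  ∃ vendedor ∈ tickets, ∃ vendas ∈ vendedor, 20 ≤ vendas ∧ vendas ≤ 500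
instance (tickets : List (List Int)) : Decidable (Pre_retorna_menor_e_maior_valor_de_vendas tickets) := by unfold Pre_retorna_menor_e_maior_valor_de_vendas; infer_instance

def pvWitness_retorna_menor_e_maior_valor_de_vendas : List (List Int) := [[25, 600], [100]]

def Spec_retorna_menor_e_maior_valor_de_vendas (tickets : List (List Int)) (out : List Int) : Prop := out = retorna_menor_e_maior_valor_de_vendas_alt tickets
instance (tickets : List (List Int)) (out : List Int) : Decidable (Spec_retorna_menor_e_maior_valor_de_vendas tickets out) := by unfold Spec_retorna_menor_e_maior_valor_de_vendas; infer_instance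

-- ===== CLAIM (what is proved, stated in full; the proofs are below) =====
def Claim_equal_retorna_menor_e_maior_valor_de_vendas : Prop := ∀ (tickets : List (List Int)), Dom_retorna_menor_e_maior_valor_de_vendas tickets → Pre_retorna_menor_e_maior_valor_de_vendas tickets → Spec_retorna_menor_e_maior_valor_de_vendas tickets (retorna_menor_e_maior_valor_de_vendas tickets)

-- ===== LEMMAS AND PROOFS =====

-- the filtered stream both programs traverse
def pvMedia (tickets : List (List Int)) : List Int :=
  tickets.flatMap (fun vd => vd.filter (fun v => decide (v ≥ 20 ∧ v ≤ 500)))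

lemma aFold_eq_media (tickets : List (List Int)) (acc : List Int) :
    tickets.foldl
      (fun acc vendedor =>
        vendedor.foldl (fun m vendas => if vendas ≥ 20 ∧ vendas ≤ 500 then m ++ [vendas] else m) acc)
      acc = acc ++ pvMedia tickets := by
  induction tickets generalizing acc with
  | nil => simp [pvMedia]
  | cons vd t ih =>
      rw [List.foldl_cons, PySem.List.foldl_append_ite_eq_filter, ih]
      simp [pvMedia]

-- B's running state, characterised as a function of the values seen so far
def pvStateOf (l : List Int) : Option Int × Option Int :=
  match l with
  | [] => (none, none)
  | x :: t => (some (t.foldl min x), some (t.foldl max x))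

lemma altStep_stateOf (l : List Int) (v : Int) :
    pvAltStep (pvStateOf l) v
      = pvStateOf (l ++ (if v ≥ 20 ∧ v ≤ 500 then [v] else [])) := by
  by_cases hp : 20 ≤ v ∧ v ≤ 500
  · cases l with
    | nil => simp [pvAltStep, pvStateOf, hp]
    | cons x t =>
        simp [pvAltStep, pvStateOf, hp, List.foldl_append, min_def, max_def]
        constructor <;> split_ifs <;> simp <;> omega
  · simp [pvAltStep, hp]

lemma altInner_stateOf (vd : List Int) (l : List Int) :
    vd.foldl pvAltStep (pvStateOf l)
      = pvStateOf (l ++ vd.filter (fun v => decide (v ≥ 20 ∧ v ≤ 500))) := by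
  induction vd generalizing l with
  | nil => simp
  | cons v t ih =>
      rw [List.foldl_cons, altStep_stateOf, ih]
      by_cases hp : v ≥ 20 ∧ v ≤ 500 <;> simp [hp]

lemma altFold_stateOf (tickets : List (List Int)) (l : List Int) :
    tickets.foldl (fun st vendedor => vendedor.foldl pvAltStep st) (pvStateOf l)
      = pvStateOf (l ++ pvMedia tickets) := by
  induction tickets generalizing l with
  | nil => simp [pvMedia]
  | cons vd t ih =>
      simp only [List.foldl_cons, altInner_stateOf, ih, pvMedia, List.flatMap_cons,
        List.append_assoc]

lemma ab_eq (tickets : List (List Int)) :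
    retorna_menor_e_maior_valor_de_vendas tickets
      = retorna_menor_e_maior_valor_de_vendas_alt tickets := by
  have hA := aFold_eq_media tickets []
  have hB := altFold_stateOf tickets []
  simp only [List.nil_append] at hA hB
  unfold retorna_menor_e_maior_valor_de_vendas retorna_menor_e_maior_valor_de_vendas_alt pvFinish
  rw [hA, show ((none, none) : Option Int × Option Int) = pvStateOf [] from rfl, hB]
  cases h : pvMedia tickets with
  | nil => simp [pvStateOf, PySem.List.min?, PySem.List.max?]
  | cons x t => simp [pvStateOf, PySem.List.min?_id_cons, PySem.List.max?_id_cons]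

-- ===== VERDICT (by name: the statement is the Claim_ definition above) =====
theorem retorna_menor_e_maior_valor_de_vendas_spec : Claim_equal_retorna_menor_e_maior_valor_de_vendas := by
  intro tickets _ _
  exact ab_eq tickets
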